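-- pv_equiv track=rewrite | github.com/ww870411/phoenix | backend/projects/monthly_data_show/services/indicator_config.py | order_items_by_config
-- ===== SOURCE A (Python) =====
-- from typing import Dict, List, Optional, Set
--
-- def _safe_str(value: object) -> str:
--     return str(value or "").strip()
--
-- def order_items_by_config(all_items: List[str], runtime_cfg: dict) -> List[str]:
--     seen: Set[str] = set()
--     ordered: List[str] = []
--     basic_names = [_safe_str(x.get("name")) for x in runtime_cfg.get("basic_items") or []]
--     calc_names = [_safe_str(x.get("name")) for x in runtime_cfg.get("calculated_items") or []]
--     for name in [*basic_names, *calc_names]: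
--         if not name or name in seen:
--             continue
--         seen.add(name)
--         ordered.append(name)
--     for name in all_items or []:
--         item = _safe_str(name)
--         if not item or item in seen:
--             continue
--         seen.add(item)
--         ordered.append(item)
--     return ordered
-- ===== SOURCE B (Python) =====
-- from typing import List
--
-- def _safe_str(value: object) -> str:
--     return str(value or "").strip()
--
-- def order_items_by_config(all_items: List[str], runtime_cfg: dict) -> List[str]:
--     pending = (
--         [_safe_str(x.get("name")) for x in runtime_cfg.get("basic_items") or []]
--         + [_safe_str(x.get("name")) for x in runtime_cfg.get("calculated_items") or []]
--         + [_safe_str(n) for n in all_items or []]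
--     )
--     ordered: List[str] = []
--     while pending:
--         head = pending[0]
--         if head:
--             ordered.append(head)
--         pending = [x for x in pending[1:] if x != head]
--     return ordered
-- ===== Notes on version B (the rewrite author's own statement) =====
-- stated objective: alternative
-- what changed: Replaces A's seen-set with two append loops by a deletion-based nub: one loop that pops the head of the flat candidate list, emits it if nonempty, and filters all its later duplicates (and, for an empty head, later empties) out of the remainder, so no seen structure exists at all.
import Mathlib
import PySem

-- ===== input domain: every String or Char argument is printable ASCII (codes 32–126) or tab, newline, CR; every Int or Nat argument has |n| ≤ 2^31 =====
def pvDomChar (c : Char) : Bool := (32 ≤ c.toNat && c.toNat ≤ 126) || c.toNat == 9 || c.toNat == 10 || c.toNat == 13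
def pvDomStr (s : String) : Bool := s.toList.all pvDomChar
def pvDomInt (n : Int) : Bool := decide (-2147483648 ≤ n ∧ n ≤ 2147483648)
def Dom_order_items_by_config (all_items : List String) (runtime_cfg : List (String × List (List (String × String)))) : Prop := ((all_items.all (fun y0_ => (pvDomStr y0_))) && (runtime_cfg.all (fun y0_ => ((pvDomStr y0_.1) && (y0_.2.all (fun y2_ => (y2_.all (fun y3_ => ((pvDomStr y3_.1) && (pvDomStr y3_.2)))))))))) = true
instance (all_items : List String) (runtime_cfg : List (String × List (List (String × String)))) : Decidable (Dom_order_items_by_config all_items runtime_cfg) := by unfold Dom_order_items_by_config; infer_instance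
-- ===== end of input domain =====

-- B replaces A's seen-set and two append loops with a deletion-based nub loop (pop head, emit if
-- nonempty, filter its duplicates out of the remainder) — a different algorithm of quadratic cost.


-- ===== PORT A =====
-- _safe_str(v) for v an Optional[str]: str(value or "").strip()  (None → "")
def pvSafeStrOpt (v : Option String) : String := PySem.Str.strip (v.getD "")
-- _safe_str(s) for s already a str: 'str(s or "")' is s itself when s ≠ "" and "" when s = "", so it is strip s
def pvSafeStr (s : String) : String := PySem.Str.strip s

-- the body of both of A's loops: skip empty or seen, else add to seen and append to ordered
def pvStepA (st : PySem.Set String × List String) (name : String) : PySem.Set String × List String :=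
  if name = "" ∨ PySem.Set.contains st.1 name then st
  else (PySem.Set.add st.1 name, st.2 ++ [name])

-- the list comprehension '[_safe_str(x.get("name")) for x in runtime_cfg.get(key) or []]' (shared verbatim by A and B)
def pvNames (runtime_cfg : List (String × List (List (String × String)))) (key : String) : List String :=
  ((PySem.Dict.mk runtime_cfg).getD key []).map (fun x => pvSafeStrOpt ((PySem.Dict.mk x).get? "name"))

def order_items_by_config (all_items : List String) (runtime_cfg : List (String × List (List (String × String)))) : List String :=
  (all_items.foldl (fun st name => pvStepA st (pvSafeStr name))
    ((pvNames runtime_cfg "basic_items" ++ pvNames runtime_cfg "calculated_items").foldl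
      pvStepA (PySem.Set.empty, []))).2

-- ===== PORT B =====
-- Source B's while loop: pop the head of pending, append it to ordered if nonempty,
-- and filter every later occurrence of it out of pending
def pvNubLoop : List String → List String → List String
  | ordered, [] => ordered
  | ordered, head :: rest =>
      pvNubLoop (if head = "" then ordered else ordered ++ [head])
        (rest.filter (fun x => x ≠ head))
termination_by _ pending => pending.length
decreasing_by
  simp only [List.length_unattach, List.length_cons]
  exact Nat.lt_succ_of_le (le_trans (List.length_filter_le _ _) (by simp))

def order_items_by_config_alt (all_items : List String) (runtime_cfg : List (String × List (List (String × String)))) : List String :=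
  pvNubLoop []
    (pvNames runtime_cfg "basic_items" ++ pvNames runtime_cfg "calculated_items"
      ++ all_items.map pvSafeStr)

-- ===== PRECONDITION & SPEC =====
def Spec_order_items_by_config (all_items : List String) (runtime_cfg : List (String × List (List (String × String)))) (out : List String) : Prop := out = order_items_by_config_alt all_items runtime_cfg
instance (all_items : List String) (runtime_cfg : List (String × List (List (String × String)))) (out : List String) : Decidable (Spec_order_items_by_config all_items runtime_cfg out) := by unfold Spec_order_items_by_config; infer_instance

-- ===== CLAIM (what is proved, stated in full; the proofs are below) =====
def Claim_equal_order_items_by_config : Prop := ∀ (all_items : List String) (runtime_cfg : List (String × List (List (String × String)))), Dom_order_items_by_config all_items runtime_cfg → Spec_order_items_by_config all_items runtime_cfg (order_items_by_config all_items runtime_cfg)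

-- ===== LEMMAS AND PROOFS =====

-- A's loop keeps seen = ordered (as lists): on the diagonal, one step is Set.add after the empty test
theorem pvStepA_diag (s : PySem.Set String) (name : String) :
    pvStepA (s, s) name = (if name = "" then (s, s) else (PySem.Set.add s name, PySem.Set.add s name)) := by
  by_cases h0 : name = "" <;> by_cases hm : name ∈ s <;>
    simp [pvStepA, PySem.Set.add, PySem.Set.contains, h0, hm]

-- folding A's step from a diagonal state is folding Set.add over the nonempty names
theorem pvFoldA_diag (l : List String) (s : PySem.Set String) :
    l.foldl pvStepA (s, s) =
      ((l.filter (fun c => c ≠ "")).foldl PySem.Set.add s,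
       (l.filter (fun c => c ≠ "")).foldl PySem.Set.add s) := by
  induction l generalizing s with
  | nil => simp
  | cons a t ih =>
    by_cases h : a = "" <;> simp [pvStepA_diag, h, ih]

-- once x is in the accumulated set, every later occurrence of x is ignored by Set.add
theorem foldl_add_filter_mem (t : List String) (s : List String) (x : String) (hx : x ∈ s) :
    t.foldl PySem.Set.add s = (t.filter (fun a => a ≠ x)).foldl PySem.Set.add s := by
  induction t generalizing s with
  | nil => rfl
  | cons a t ih =>
    by_cases h : a = x
    · subst h
      simp [PySem.Set.add, PySem.Set.contains, hx, ih s hx]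
    · have hx' : x ∈ PySem.Set.add s a := by
        simp [PySem.Set.add, PySem.Set.contains]
        split <;> simp [hx]
      simp [h, ih _ hx']

-- an element absent from t can be peeled off the front of the accumulator
theorem foldl_add_cons_notmem (t : List String) (s : List String) (x : String) (hx : x ∉ t) :
    t.foldl PySem.Set.add (x :: s) = x :: t.foldl PySem.Set.add s := by
  induction t generalizing s with
  | nil => rfl
  | cons a t ih =>
    have ha : a ≠ x := by rintro rfl; exact hx (List.mem_cons_self ..)
    have hx' : x ∉ t := fun h => hx (List.mem_cons_of_mem _ h)
    have : PySem.Set.add (x :: s) a = x :: PySem.Set.add s a := by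
      simp [PySem.Set.add, PySem.Set.contains, ha]
      split <;> simp
    simp [this, ih _ hx']

-- Source B's deletion loop computes ordered ++ set(nonempty candidates) (first occurrences, in order)
theorem pvNubLoop_eq (n : Nat) :
    ∀ (l acc : List String), l.length ≤ n →
      pvNubLoop acc l = acc ++ (l.filter (fun x => x ≠ "")).foldl PySem.Set.add [] := by
  induction n with
  | zero =>
    intro l acc hl
    have : l = [] := List.eq_nil_of_length_eq_zero (Nat.le_zero.mp hl)
    subst this; simp [pvNubLoop]
  | succ n ih =>
    intro l acc hl
    match l with
    | [] => simp [pvNubLoop]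
    | h :: t =>
      have ht : (t.filter (fun x => x ≠ h)).length ≤ n :=
        le_trans (List.length_filter_le _ _) (Nat.lt_succ_iff.mp (by simpa using hl))
      by_cases h0 : h = ""
      · subst h0
        rw [show pvNubLoop acc ("" :: t) = pvNubLoop acc (t.filter (fun x => x ≠ "")) from by rw [pvNubLoop.eq_def]; simp, ih _ _ ht]
        simp [List.filter_filter]
      · rw [show pvNubLoop acc (h :: t) = pvNubLoop (acc ++ [h]) (t.filter (fun x => x ≠ h)) from by rw [pvNubLoop.eq_def]; simp [h0], ih _ _ ht]
        have hcomm : (t.filter (fun x => x ≠ h)).filter (fun x => x ≠ "") =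
            (t.filter (fun x => x ≠ "")).filter (fun a => a ≠ h) := by
          simp [List.filter_filter, Bool.and_comm]
        have hnot : h ∉ (t.filter (fun x => x ≠ "")).filter (fun a => a ≠ h) := by
          simp
        calc acc ++ [h] ++ ((t.filter (fun x => x ≠ h)).filter (fun x => x ≠ "")).foldl PySem.Set.add []
            = acc ++ [h] ++ ((t.filter (fun x => x ≠ "")).filter (fun a => a ≠ h)).foldl PySem.Set.add [] := by
              rw [hcomm]
          _ = acc ++ ((t.filter (fun x => x ≠ "")).filter (fun a => a ≠ h)).foldl PySem.Set.add [h] := by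
              rw [foldl_add_cons_notmem _ _ _ hnot]; simp
          _ = acc ++ ((h :: t).filter (fun x => x ≠ "")).foldl PySem.Set.add [] := by
              rw [← foldl_add_filter_mem _ [h] h (List.mem_singleton.mpr rfl)]
              simp [h0, PySem.Set.add, PySem.Set.contains]

theorem order_items_by_config_eq_alt (all_items : List String) (runtime_cfg : List (String × List (List (String × String)))) :
    order_items_by_config all_items runtime_cfg = order_items_by_config_alt all_items runtime_cfg := by
  unfold order_items_by_config order_items_by_config_alt
  rw [← List.foldl_map (f := pvSafeStr) (g := pvStepA), ← List.foldl_append,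
    show ((PySem.Set.empty : PySem.Set String), ([] : List String)) = (PySem.Set.empty, PySem.Set.empty) from rfl,
    pvFoldA_diag, pvNubLoop_eq _ _ [] (le_refl _)]
  simp [PySem.Set.empty, List.append_assoc]

-- ===== VERDICT (by name: the statement is the Claim_ definition above) =====
theorem order_items_by_config_spec : Claim_equal_order_items_by_config := by
  intro all_items runtime_cfg _
  exact order_items_by_config_eq_alt all_items runtime_cfg
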